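-- pv_equiv track=rewrite | github.com/stefanoppp/um-programacion-i-2020 | 58105-Santander-Franco/tps/tp1/ej4_oop.py | val_num
-- ===== SOURCE A (Python) =====
-- def val_num(num):
--     if num > 0:
--         caracter = '*'
--         lis = []
--         for i in range(0, num + 1):
--             lis.append(str(caracter * i))
--         return lis
--     else:
--         return("Ingrese un numero valido")
-- ===== SOURCE B (Python) =====
-- def val_num(num):
--     if num > 0:
--         lis = ['']
--         row = ''
--         for _ in range(num):
--             row += '*'
--             lis.append(row)
--         return lis
--     else:
--         return("Ingrese un numero valido")
-- ===== Notes on version B (the rewrite author's own statement) =====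
-- stated objective: alternative
-- what changed: B grows each row from the previous one by appending a single '*' (incremental accumulator) instead of recomputing '*' * i from scratch for every index of range(0, num+1).
-- outside the precondition, e.g. on val_num(0): A returns 'Ingrese un numero valido', B returns 'Ingrese un numero valido'
import Mathlib
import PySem

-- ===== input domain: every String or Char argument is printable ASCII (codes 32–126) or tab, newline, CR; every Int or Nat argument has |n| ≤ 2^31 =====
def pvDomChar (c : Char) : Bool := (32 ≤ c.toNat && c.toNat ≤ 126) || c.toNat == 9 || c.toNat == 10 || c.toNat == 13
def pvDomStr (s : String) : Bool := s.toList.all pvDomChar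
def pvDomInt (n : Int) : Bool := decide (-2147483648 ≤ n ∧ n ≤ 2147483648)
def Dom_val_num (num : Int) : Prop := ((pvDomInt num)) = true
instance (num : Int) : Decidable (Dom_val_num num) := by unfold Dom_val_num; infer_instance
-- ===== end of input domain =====

-- B builds each row incrementally from the previous row (prev + '*') instead of recomputing '*' * i per index; equivalence proved for num > 0 (Pre_ excludes num ≤ 0, where A returns an error string, not a list).


-- ===== PORT A =====
-- '*' * i ported as List.replicate i.toNat '*' (exact for the nonnegative i that range yields).
-- In the else branch A returns the error STRING "Ingrese un numero valido" (not a list[str]);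
-- that branch is excluded by Pre_val_num, the port returns [] there.
def val_num (num : Int) : List String :=
  if num > 0 then
    (PySem.List.pyRange 0 (num + 1) 1).map
      (fun i => String.ofList (List.replicate i.toNat '*'))
  else []

-- ===== PORT B =====
-- Source B's loop: row starts '', each of the num iterations appends '*' to row and pushes it.
def valNumGo : Nat → List Char → List String
  | 0, _ => []
  | n + 1, row =>
    let nxt := row ++ ['*']
    String.ofList nxt :: valNumGo n nxt

def val_num_alt (num : Int) : List String :=
  if num > 0 then "" :: valNumGo num.toNat [] else []

-- ===== PRECONDITION & SPEC =====
-- Pre_ excludes num ≤ 0, where A returns the error string "Ingrese un numero valido",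
-- which is not a value of the declared return type list[str].
def Pre_val_num (num : Int) : Prop := 0 < num
instance (num : Int) : Decidable (Pre_val_num num) := by unfold Pre_val_num; infer_instance
def pvWitness_val_num : Int := 3

def Spec_val_num (num : Int) (out : List String) : Prop := out = val_num_alt num
instance (num : Int) (out : List String) : Decidable (Spec_val_num num out) := by unfold Spec_val_num; infer_instance

-- ===== CLAIM (what is proved, stated in full; the proofs are below) =====
def Claim_equal_val_num : Prop := ∀ (num : Int), Dom_val_num num → Pre_val_num num → Spec_val_num num (val_num num)

-- ===== LEMMAS AND PROOFS =====
theorem valNumGo_replicate (n k : Nat) :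
    valNumGo n (List.replicate k '*') =
      (List.range n).map (fun j => String.ofList (List.replicate (k + j + 1) '*')) := by
  induction n generalizing k with
  | zero => simp [valNumGo]
  | succ m ih =>
    have h : List.replicate k '*' ++ ['*'] = List.replicate (k + 1) '*' := by
      simpa using (List.replicate_succ' (n := k) (a := '*')).symm
    rw [List.range_succ_eq_map]
    simp only [valNumGo, h, ih (k + 1), List.map_cons, List.map_map, Nat.add_zero]
    refine congrArg₂ List.cons rfl ?_
    refine List.map_congr_left ?_
    intro a _
    simp only [Function.comp_apply, Nat.succ_eq_add_one]
    have hx : k + 1 + a + 1 = k + (a + 1) + 1 := by omega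
    rw [hx]

-- ===== VERDICT (by name: the statement is the Claim_ definition above) =====
theorem val_num_spec : Claim_equal_val_num := by
  intro num _ hpre
  unfold Spec_val_num val_num val_num_alt
  have hpos : num > 0 := hpre
  rw [if_pos hpos, if_pos hpos]
  obtain ⟨n, rfl⟩ : ∃ n : Nat, num = (n : Int) + 1 := by
    refine ⟨(num - 1).toNat, ?_⟩; omega
  rw [PySem.List.pyRange_one]
  have hlen : ((n : Int) + 1 + 1 - 0).toNat = n + 2 := by omega
  have hn1 : ((n : Int) + 1).toNat = n + 1 := by omega
  rw [hlen, hn1]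
  have hbase : valNumGo (n + 1) ([] : List Char) =
      (List.range (n + 1)).map (fun j => String.ofList (List.replicate (j + 1) '*')) := by
    have := valNumGo_replicate (n + 1) 0
    simpa using this
  rw [hbase, List.range_succ_eq_map]
  simp only [List.map_cons, List.map_map]
  refine congrArg₂ List.cons ?_ ?_
  · decide
  · refine List.map_congr_left ?_
    intro j _
    simp only [Function.comp_apply, Nat.succ_eq_add_one]
    have hj : ((0 : Int) + (↑(j + 1) : Int)).toNat = j + 1 := by omega
    rw [hj]
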